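-- pv_equiv track=rewrite | github.com/junyonglee0223/baek | test.py | solution
-- ===== SOURCE A (Python) =====
-- def solution(rc, operations):
--     r = len(rc)
--     c = len(rc[0])
--
--     for op in operations:
--         if op == "Rotate":
--             top = rc[0][1:-1]
--             right = [row[-1] for row in rc[1:-1]]
--             bottom = rc[-1][-2:0:-1]
--             left = [row[0] for row in rc[-2:0:-1]]
--
--             rotated_top = [rc[0][0]] + top
--             rotated_right = right + [rc[0][-1]]
--             rotated_bottom = [rc[-1][-1]] + bottom
--             rotated_left = left + [rc[-1][0]]
--
--             rc[0] = [rotated_left[0]] + rotated_top + [rotated_right[0]]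
--             for i in range(1, len(rc) - 1):
--                 rc[i] = [rotated_left[i]] + rc[i][1:-1] + [rotated_right[i]]
--             rc[-1] = [rotated_left[-1]] + rotated_bottom + [rotated_right[-1]]
--
--
--         elif op == "ShiftRow":
--             tmp_row = rc[-1]
--             for i in range(r-1, 0, -1):
--                 rc[i] = rc[i-1]
--             rc[0] = tmp_row
--
--     return rc
-- ===== SOURCE B (Python) =====
-- def _rot1(xs):
--     return xs[1:] + xs[:1]
--
--
-- def _rotate_border(g):
--     lefts = [row[0] for row in g]
--     rights = [row[-1] for row in g]
--     rl = _rot1(lefts[:0:-1])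
--     rr = _rot1(rights[:-1])
--     t, b = g[0], g[-1]
--     out = [[rl[0], t[0], *t[1:-1], rr[0]]]
--     for i in range(1, len(g) - 1):
--         out.append([rl[i], *g[i][1:-1], rr[i]])
--     out.append([rl[-1], b[-1], *b[-2:0:-1], rr[-1]])
--     return out
--
--
-- def solution(rc, operations):
--     n = len(rc)
--     grid = rc[:]
--     pending = 0
--     for op in operations:
--         if op == "ShiftRow":
--             pending += 1
--         elif op == "Rotate":
--             if pending:
--                 s = pending % n
--                 grid = grid[n - s:] + grid[:n - s]
--                 pending = 0
--             grid = _rotate_border(grid)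
--     if pending:
--         s = pending % n
--         grid = grid[n - s:] + grid[:n - s]
--     rc[:] = grid
--     return rc
-- ===== Notes on version B (the rewrite author's own statement) =====
-- stated objective: alternative
-- what changed: B batches consecutive ShiftRows into one pending counter applied as a single block rotation (two slices) instead of A's per-op index loop, and each Rotate rebuilds the grid functionally from the two extracted border columns (rotated as whole lists) instead of A's in-place per-row slice surgery; Pre_ excludes empty grids / grids with an empty row under Rotate (A raises IndexError) and single-row grids under Rotate, where A's value comes from its bottom-row write overwriting its own top-row write.
-- outside the precondition, e.g. on solution([[1, 2]], ['Rotate']): A returns [[1, 2, 2]], B raises IndexError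
import Mathlib
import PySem

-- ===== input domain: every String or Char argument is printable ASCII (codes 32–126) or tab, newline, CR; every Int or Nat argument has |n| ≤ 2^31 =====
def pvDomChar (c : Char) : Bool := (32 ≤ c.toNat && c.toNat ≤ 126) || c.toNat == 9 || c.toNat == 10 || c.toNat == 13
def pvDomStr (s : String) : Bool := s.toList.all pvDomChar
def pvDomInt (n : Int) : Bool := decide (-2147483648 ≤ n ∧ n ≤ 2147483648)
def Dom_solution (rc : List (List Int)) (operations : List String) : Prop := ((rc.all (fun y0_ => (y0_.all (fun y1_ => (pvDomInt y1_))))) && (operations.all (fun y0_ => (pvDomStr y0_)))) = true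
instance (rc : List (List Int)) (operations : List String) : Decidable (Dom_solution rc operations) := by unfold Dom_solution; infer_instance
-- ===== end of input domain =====

-- B processes the operation stream differently: it BATCHES consecutive "ShiftRow"s into one
-- pending counter applied as a single block rotation (two slices), and each "Rotate" rebuilds
-- the grid functionally from the two extracted border columns (lefts/rights rotated as lists)
-- instead of A's per-row in-place slice surgery; objective: alternative.
-- A mutates rc's rows in place; B only assigns rc[:] once at the end — the theorems are about the return value.

-- ===== PORT A =====
-- one "Rotate" step of A (rc[0] is pyGetD g 0 [], rc[-1] is pyGetD g (-1) []; exact inside Pre_)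
def pvRotA (g : List (List Int)) : List (List Int) :=
  let row0 := PySem.List.pyGetD g 0 []
  let rowL := PySem.List.pyGetD g (-1) []
  let top := PySem.List.slice row0 (some 1) (some (-1))
  let right := (PySem.List.slice g (some 1) (some (-1))).map (fun row => PySem.List.pyGetD row (-1) 0)
  let bottom := (PySem.List.slice? rowL (some (-2)) (some 0) (-1)).getD []
  let left := ((PySem.List.slice? g (some (-2)) (some 0) (-1)).getD []).map (fun row => PySem.List.pyGetD row 0 0)
  let rotated_top := [PySem.List.pyGetD row0 0 0] ++ top
  let rotated_right := right ++ [PySem.List.pyGetD row0 (-1) 0]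
  let rotated_bottom := [PySem.List.pyGetD rowL (-1) 0] ++ bottom
  let rotated_left := left ++ [PySem.List.pyGetD rowL 0 0]
  let g0 := PySem.List.pySetD g 0 ([PySem.List.pyGetD rotated_left 0 0] ++ rotated_top ++ [PySem.List.pyGetD rotated_right 0 0])
  let g1 := (PySem.List.pyRange 1 ((g0.length : Int) - 1)).foldl (fun h i =>
      PySem.List.pySetD h i ([PySem.List.pyGetD rotated_left i 0] ++ PySem.List.slice (PySem.List.pyGetD h i []) (some 1) (some (-1)) ++ [PySem.List.pyGetD rotated_right i 0])) g0
  PySem.List.pySetD g1 (-1) ([PySem.List.pyGetD rotated_left (-1) 0] ++ rotated_bottom ++ [PySem.List.pyGetD rotated_right (-1) 0])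

-- one "ShiftRow" step of A (r = len(rc) computed at function entry)
def pvShiftA (r : Int) (g : List (List Int)) : List (List Int) :=
  let tmp := PySem.List.pyGetD g (-1) []
  let g1 := (PySem.List.pyRange (r - 1) 0 (-1)).foldl (fun h i => PySem.List.pySetD h i (PySem.List.pyGetD h (i - 1) [])) g
  PySem.List.pySetD g1 0 tmp

-- A: c = len(rc[0]) is computed (and raises on rc = [], excluded by Pre_) but never used
def solution (rc : List (List Int)) (operations : List String) : List (List Int) :=
  let r : Int := rc.length
  operations.foldl (fun g op => if op = "Rotate" then pvRotA g else if op = "ShiftRow" then pvShiftA r g else g) rc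

-- ===== PORT B =====
-- _rot1(xs) = xs[1:] + xs[:1]
def pvRot1 (xs : List Int) : List Int :=
  PySem.List.slice xs (some 1) none ++ PySem.List.slice xs none (some 1)

-- _rotate_border(g): grid rebuilt from the two border columns (the loop appends rows → foldl ++)
def pvRotBorder (g : List (List Int)) : List (List Int) :=
  let lefts := g.map (fun row => PySem.List.pyGetD row 0 0)
  let rights := g.map (fun row => PySem.List.pyGetD row (-1) 0)
  let rl := pvRot1 ((PySem.List.slice? lefts none (some 0) (-1)).getD [])
  let rr := pvRot1 (PySem.List.slice rights none (some (-1)))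
  let t := PySem.List.pyGetD g 0 []
  let b := PySem.List.pyGetD g (-1) []
  let first := [PySem.List.pyGetD rl 0 0, PySem.List.pyGetD t 0 0] ++ PySem.List.slice t (some 1) (some (-1)) ++ [PySem.List.pyGetD rr 0 0]
  let out := (PySem.List.pyRange 1 ((g.length : Int) - 1)).foldl (fun acc i =>
      acc ++ [[PySem.List.pyGetD rl i 0] ++ PySem.List.slice (PySem.List.pyGetD g i []) (some 1) (some (-1)) ++ [PySem.List.pyGetD rr i 0]]) [first]
  out ++ [[PySem.List.pyGetD rl (-1) 0, PySem.List.pyGetD b (-1) 0] ++ (PySem.List.slice? b (some (-2)) (some 0) (-1)).getD [] ++ [PySem.List.pyGetD rr (-1) 0]]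

-- the pending ShiftRows applied at once: grid[n-s:] + grid[:n-s] with s = pending % n
def pvShiftRows (n : Int) (pending : Int) (g : List (List Int)) : List (List Int) :=
  if pending ≠ 0 then
    let s := PySem.Int.mod pending n
    PySem.List.slice g (some (n - s)) none ++ PySem.List.slice g none (some (n - s))
  else g

def solution_alt (rc : List (List Int)) (operations : List String) : List (List Int) :=
  let n : Int := rc.length
  let p := operations.foldl (fun (p : List (List Int) × Int) op =>
      if op = "ShiftRow" then (p.1, p.2 + 1)
      else if op = "Rotate" then (pvRotBorder (pvShiftRows n p.2 p.1), 0)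
      else p) (rc, 0)
  pvShiftRows n p.2 p.1

-- ===== PRECONDITION & SPEC =====
-- Pre_ excludes exactly: the empty grid and grids with an empty row when some op is "Rotate"
-- (Python A raises IndexError there), and single-row grids when some op is "Rotate" — there A's
-- final bottom-row write silently overwrites its own top-row write, an accident of its in-place
-- updates, and B's border rotation naturally raises (IndexError) instead of matching it.
def Pre_solution (rc : List (List Int)) (operations : List String) : Prop :=
  rc ≠ [] ∧ ("Rotate" ∈ operations → 2 ≤ rc.length ∧ ∀ row ∈ rc, row ≠ [])
instance (rc : List (List Int)) (operations : List String) : Decidable (Pre_solution rc operations) := by unfold Pre_solution; infer_instance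

def pvWitness_solution : List (List Int) × List String :=
  ([[1, 2, 3], [4, 5, 6], [7, 8, 9]], ["Rotate", "ShiftRow", "Rotate"])

def Spec_solution (rc : List (List Int)) (operations : List String) (out : List (List Int)) : Prop := out = solution_alt rc operations
instance (rc : List (List Int)) (operations : List String) (out : List (List Int)) : Decidable (Spec_solution rc operations out) := by unfold Spec_solution; infer_instance

-- ===== CLAIM (what is proved, stated in full; the proofs are below) =====
def Claim_equal_solution : Prop := ∀ (rc : List (List Int)) (operations : List String), Dom_solution rc operations → Pre_solution rc operations → Spec_solution rc operations (solution rc operations)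

-- ===== LEMMAS AND PROOFS =====

-- generic list facts about the ports' primitives
theorem pv_slice_map {α β : Type} (f : α → β) (xs : List α) (a? b? : Option Int) :
    PySem.List.slice (xs.map f) a? b? = (PySem.List.slice xs a? b?).map f := by
  simp [PySem.List.slice, List.map_take, List.map_drop]

theorem pv_slice?_map {α β : Type} (f : α → β) (xs : List α) (a? b? : Option Int) (st : Int) :
    PySem.List.slice? (xs.map f) a? b? st = (PySem.List.slice? xs a? b? st).map (List.map f) := by
  simp [PySem.List.slice?]
  split_ifs <;> simp [List.map_filterMap]

theorem pv_optmap_getD {α β : Type} (o : Option (List α)) (f : α → β) :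
    (o.map (List.map f)).getD [] = List.map f (o.getD []) := by cases o <;> rfl

theorem pv_set_last {α : Type} (xs : List α) (y : α) (h : xs ≠ []) :
    xs.set (xs.length - 1) y = xs.dropLast ++ [y] := by
  induction xs with
  | nil => simp at h
  | cons a t ih =>
    cases t with
    | nil => simp
    | cons b u =>
      have := ih (by simp)
      simp only [List.length_cons, Nat.add_sub_cancel] at this ⊢
      simp [List.dropLast_cons₂, this]

theorem pv_pySetD_neg_one {α : Type} (xs : List α) (y : α) :
    PySem.List.pySetD xs (-1) y = xs.set (xs.length - 1) y := by
  cases xs with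
  | nil => simp [PySem.List.pySetD, PySem.List.pySet?, PySem.List.pyIdx?]
  | cons a t => simp [PySem.List.pySetD, PySem.List.pySet?, PySem.List.pyIdx?]

theorem pv_slice_one_neg_one {α : Type} (xs : List α) :
    PySem.List.slice xs (some 1) (some (-1)) = xs.tail.dropLast := by
  simp [PySem.List.slice, PySem.List.clampIdx]
  cases xs with
  | nil => simp
  | cons a t => simp [List.dropLast_eq_take]

theorem pv_getD_map_nil {f : List Int → Int} (hf : f [] = 0) (g : List (List Int)) (i : Int) :
    PySem.List.pyGetD (g.map f) i 0 = f (PySem.List.pyGetD g i []) := by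
  conv_lhs => rw [← hf]
  exact PySem.List.pyGetD_map f g i []

-- the reversed-slice closed forms behind the two programs' border columns
theorem pv_filterMap_rev {α : Type} (l : List α) (s : Nat) (hs : s < l.length) :
    ∀ j : Nat, j ≤ s + 1 →
    List.filterMap (fun k : Nat => l[((s:Int) - (k:Int)).toNat]?) (List.range j)
      = ((l.drop (s+1-j)).take j).reverse := by
  intro j
  induction j with
  | zero => simp
  | succ m ih =>
    intro hm
    rw [List.range_succ, List.filterMap_append, ih (by omega)]
    have hsm : s - m < l.length := by omega
    rw [show List.filterMap (fun k : Nat => l[((s:Int) - (k:Int)).toNat]?) [m]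
        = [l[s-m]] from by simp [List.getElem?_eq_getElem hsm]]
    rw [show s + 1 - (m+1) = s - m from by omega,
      show s + 1 - m = s - m + 1 from by omega,
      List.drop_eq_getElem_cons hsm, List.take_succ_cons, List.reverse_cons]

theorem pv_id2 (l : List Int) (h : 2 ≤ l.length) :
    (PySem.List.slice? l none (some 0) (-1)).getD [] = l.tail.reverse := by
  simp [PySem.List.slice?, PySem.List.sliceIndices]
  rw [if_pos (by omega), show (min (0:Int) ((l.length:Int) - 1)) = 0 from by omega]
  rw [sub_zero, show ((l.length:Int) - 1).toNat = l.length - 1 from by omega]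
  have key := pv_filterMap_rev l (l.length - 1) (by omega) (l.length - 1) (by omega)
  rw [show List.filterMap (fun x : Nat => l[((l.length:Int) - 1 + -(x:Int)).toNat]?) (List.range (l.length - 1))
      = List.filterMap (fun x : Nat => l[(((l.length - 1 : Nat):Int) - (x:Int)).toNat]?) (List.range (l.length - 1)) from by
        apply List.filterMap_congr; intro x _; congr 1; omega]
  rw [key, show l.length - 1 + 1 - (l.length - 1) = 1 from by omega, List.drop_one,
    List.take_of_length_le (by simp)]

theorem pv_id1 (l : List Int) (h : 2 ≤ l.length) :
    (PySem.List.slice? l (some (-2)) (some 0) (-1)).getD [] = l.tail.reverse.tail := by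
  simp [PySem.List.slice?, PySem.List.sliceIndices]
  by_cases h2 : (2:Int) < l.length
  · rw [if_pos (by left; omega), show (min (0:Int) ((l.length:Int) - 1)) = 0 from by omega,
      show (max (-2 + (l.length:Int)) (-1)) = (l.length:Int) - 2 from by omega]
    rw [sub_zero, show ((l.length:Int) - 2).toNat = l.length - 2 from by omega]
    have key := pv_filterMap_rev l (l.length - 2) (by omega) (l.length - 2) (by omega)
    rw [show List.filterMap (fun x : Nat => l[((l.length:Int) - 2 + -(x:Int)).toNat]?) (List.range (l.length - 2))
        = List.filterMap (fun x : Nat => l[(((l.length - 2 : Nat):Int) - (x:Int)).toNat]?) (List.range (l.length - 2)) from by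
          apply List.filterMap_congr; intro x _; congr 1; omega]
    rw [key, show l.length - 2 + 1 - (l.length - 2) = 1 from by omega, List.drop_one]
    rw [List.dropLast_eq_take]
    congr 2
    simp only [List.length_tail]
    omega
  · have hl : l.length = 2 := by omega
    rw [if_neg (by omega)]
    have : l.tail.dropLast = [] := by
      rw [List.dropLast_eq_take, show l.tail.length - 1 = 0 from by simp [hl]]
      simp
    simp [this]

theorem pv_take1_tail_rev (l : List Int) (h : 2 ≤ l.length) :
    l.tail.reverse.take 1 = [PySem.List.pyGetD l (-1) 0] := by
  have hne : l ≠ [] := by intro e; simp [e] at h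
  obtain ⟨init, x, rfl⟩ := (List.eq_nil_or_concat l).resolve_left hne
  have hinit : init ≠ [] := by intro e; simp [e] at h
  obtain ⟨a, t, rfl⟩ := List.exists_cons_of_ne_nil hinit
  rw [PySem.List.pyGetD_neg_one _ _ (by simp)]
  simp

theorem pv_take1_dropLast (l : List Int) (h : 2 ≤ l.length) :
    l.dropLast.take 1 = [PySem.List.pyGetD l 0 0] := by
  obtain ⟨a, t, rfl⟩ := List.exists_cons_of_ne_nil (show l ≠ [] by intro e; simp [e] at h)
  obtain ⟨b, u, rfl⟩ := List.exists_cons_of_ne_nil (show t ≠ [] by intro e; rw [e] at h; simp at h)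
  rw [show (0:Int) = ((0:Nat):Int) from rfl, PySem.List.pyGetD_natCast]
  simp [List.dropLast_cons₂]

-- the two programs compute the same new-border columns
theorem pv_rl_eq (l : List Int) (h : 2 ≤ l.length) :
    pvRot1 ((PySem.List.slice? l none (some 0) (-1)).getD [])
      = (PySem.List.slice? l (some (-2)) (some 0) (-1)).getD [] ++ [PySem.List.pyGetD l (-1) 0] := by
  unfold pvRot1
  rw [pv_id2 l h, pv_id1 l h, PySem.List.slice_from_one, PySem.List.slice_to _ (by omega : (0:Int) ≤ 1)]
  rw [show ((1:Int)).toNat = 1 from rfl, pv_take1_tail_rev l h]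

theorem pv_rr_eq (l : List Int) (h : 2 ≤ l.length) :
    pvRot1 (PySem.List.slice l none (some (-1)))
      = PySem.List.slice l (some 1) (some (-1)) ++ [PySem.List.pyGetD l 0 0] := by
  unfold pvRot1
  rw [PySem.List.slice_to_neg_one, PySem.List.slice_from_one, PySem.List.slice_to _ (by omega : (0:Int) ≤ 1)]
  rw [show ((1:Int)).toNat = 1 from rfl, pv_take1_dropLast l h, pv_slice_one_neg_one, List.tail_dropLast]

-- A's middle loop writes index i from the untouched row i: it is a map over the range
theorem pv_foldl_set_map (F : List Int → Int → List Int) :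
    ∀ (d : Nat) (a : Nat) (g : List (List Int)), a + d ≤ g.length →
    (PySem.List.pyRange (a:Int) ((a:Int) + (d:Int))).foldl
        (fun h i => PySem.List.pySetD h i (F (PySem.List.pyGetD h i []) i)) g
      = g.take a ++ ((PySem.List.pyRange (a:Int) ((a:Int) + (d:Int))).map
          (fun i => F (PySem.List.pyGetD g i []) i)) ++ g.drop (a + d) := by
  intro d
  induction d with
  | zero =>
    intro a g hlen
    rw [show ((a:Int) + ((0:Nat):Int)) = (a:Int) from by push_cast; ring]
    rw [PySem.List.pyRange_one_eq_nil (by omega)]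
    simp
  | succ m ih =>
    intro a g hlen
    have ha : a < g.length := by omega
    have hcons : PySem.List.pyRange (a:Int) ((a:Int) + ((m+1:Nat):Int))
        = (a:Int) :: PySem.List.pyRange ((a:Int)+1) ((a:Int) + ((m+1:Nat):Int)) :=
      PySem.List.pyRange_one_cons (by push_cast; omega)
    rw [hcons]
    simp only [List.foldl_cons, List.map_cons]
    set v := F (PySem.List.pyGetD g (a:Int) []) (a:Int) with hv
    have hset : PySem.List.pySetD g (a:Int) v = g.set a v := PySem.List.pySetD_natCast g a v
    have hbound : ((a:Int) + 1) = (((a+1:Nat)):Int) := by push_cast; ring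
    have hbound2 : ((a:Int) + ((m+1:Nat):Int)) = (((a+1:Nat)):Int) + ((m:Nat):Int) := by push_cast; ring
    rw [hset, hbound, hbound2, ih (a+1) (g.set a v) (by simp; omega)]
    have hget : ∀ i ∈ PySem.List.pyRange (((a+1:Nat)):Int) ((((a+1:Nat)):Int) + ((m:Nat):Int)),
        F (PySem.List.pyGetD (g.set a v) i []) i = F (PySem.List.pyGetD g i []) i := by
      intro i hi
      rw [PySem.List.mem_pyRange_one] at hi
      have h0 : (0:Int) ≤ i := by push_cast at hi; omega
      obtain ⟨j, rfl⟩ := Int.eq_ofNat_of_zero_le h0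
      rw [PySem.List.pyGetD_natCast, PySem.List.pyGetD_natCast]
      have hj : a ≠ j := by push_cast at hi; omega
      simp [List.getD, List.getElem?_set_ne hj]
    rw [List.map_congr_left hget]
    have htake : (g.set a v).take (a+1) = g.take a ++ [v] := by
      rw [List.take_set, List.take_add_one, List.getElem?_eq_getElem ha]
      rw [List.set_append]
      simp only [List.length_take, Option.toList_some]
      rw [if_neg (by omega), show a - min a g.length = 0 from by omega]
      rfl
    have hdrop : (g.set a v).drop (a+1+m) = g.drop (a+(m+1)) := by
      rw [List.drop_set, if_pos (by omega), show a+1+m = a+(m+1) from by omega]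
    rw [htake, hdrop]
    simp

theorem pv_getD_map_head (g : List (List Int)) (i : Int) :
    PySem.List.pyGetD (g.map (fun row => PySem.List.pyGetD row 0 0)) i 0 =
      PySem.List.pyGetD (PySem.List.pyGetD g i []) 0 0 :=
  pv_getD_map_nil rfl g i

theorem pv_getD_map_last (g : List (List Int)) (i : Int) :
    PySem.List.pyGetD (g.map (fun row => PySem.List.pyGetD row (-1) 0)) i 0 =
      PySem.List.pyGetD (PySem.List.pyGetD g i []) (-1) 0 :=
  pv_getD_map_nil rfl g i

theorem pv_pySetD_zero {α : Type} (x : α) (t : List α) (v : α) :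
    PySem.List.pySetD (x :: t) 0 v = v :: t := by
  rw [show (0:Int) = ((0:Nat):Int) from rfl, PySem.List.pySetD_natCast]
  rfl

theorem pv_getD_cons_eq {α : Type} (x y : α) (t : List α) (i : Int) (h : 1 ≤ i) (d : α) :
    PySem.List.pyGetD (x :: t) i d = PySem.List.pyGetD (y :: t) i d := by
  obtain ⟨j, rfl⟩ := Int.eq_ofNat_of_zero_le (by omega : (0:Int) ≤ i)
  rw [PySem.List.pyGetD_natCast, PySem.List.pyGetD_natCast]
  cases j with
  | zero => exact absurd h (by norm_num)
  | succ m => simp [List.getD]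

theorem pv_drop_len_sub_one {α : Type} (l : List α) (h : l ≠ []) :
    l.drop (l.length - 1) = [l.getLast h] := by
  obtain ⟨init, x, rfl⟩ := (List.eq_nil_or_concat l).resolve_left h
  simp

-- A's middle loop in closed form
theorem pv_rotA_loop (RL RR : List Int) (g0 : List (List Int)) (B : Int)
    (hB : B = (g0.length:Int) - 1) (hlen : 2 ≤ g0.length) :
    (PySem.List.pyRange 1 B).foldl (fun h i =>
      PySem.List.pySetD h i ([PySem.List.pyGetD RL i 0] ++ PySem.List.slice (PySem.List.pyGetD h i []) (some 1) (some (-1)) ++ [PySem.List.pyGetD RR i 0])) g0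
    = g0.take 1 ++ ((PySem.List.pyRange 1 B).map (fun i =>
        [PySem.List.pyGetD RL i 0] ++ PySem.List.slice (PySem.List.pyGetD g0 i []) (some 1) (some (-1)) ++ [PySem.List.pyGetD RR i 0])) ++ g0.drop (g0.length - 1) := by
  subst hB
  have hb : ((g0.length:Int) - 1) = (((1:Nat)):Int) + (((g0.length - 2:Nat)):Int) := by omega
  rw [hb, show (1:Int) = ((1:Nat):Int) from rfl]
  have key := pv_foldl_set_map (fun row i => [PySem.List.pyGetD RL i 0] ++ PySem.List.slice row (some 1) (some (-1)) ++ [PySem.List.pyGetD RR i 0]) (g0.length-2) 1 g0 (by omega)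
  simpa [show 1 + (g0.length-2) = g0.length - 1 from by omega] using key

-- the central equality: one Rotate of A = one border rebuild of B (any grid of ≥ 2 rows)
theorem pv_rot_eq (g : List (List Int)) (h : 2 ≤ g.length) : pvRotA g = pvRotBorder g := by
  have hg : g ≠ [] := by intro e; rw [e] at h; simp at h
  have hrl := pv_rl_eq (g.map (fun row => PySem.List.pyGetD row 0 0)) (by simpa using h)
  have hrr := pv_rr_eq (g.map (fun row => PySem.List.pyGetD row (-1) 0)) (by simpa using h)
  simp only [pvRotBorder]
  rw [hrl, hrr]
  simp only [pv_slice?_map, pv_optmap_getD, pv_slice_map, pv_getD_map_head, pv_getD_map_last,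
    pvRotA, PySem.List.length_pySetD]
  obtain ⟨gh, gt, rfl⟩ := List.exists_cons_of_ne_nil hg
  have hgt : gt ≠ [] := by intro e; rw [e] at h; simp at h
  generalize (List.map (fun row => PySem.List.pyGetD row 0 0)
      ((PySem.List.slice? (gh :: gt) (some (-2)) (some 0) (-1)).getD []) ++
      [PySem.List.pyGetD (PySem.List.pyGetD (gh :: gt) (-1) []) 0 0]) = RL
  generalize (List.map (fun row => PySem.List.pyGetD row (-1) 0)
      (PySem.List.slice (gh :: gt) (some 1) (some (-1))) ++
      [PySem.List.pyGetD (PySem.List.pyGetD (gh :: gt) 0 []) (-1) 0]) = RR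
  rw [pv_pySetD_zero]
  rw [pv_rotA_loop RL RR _ _ (by simp) (by simpa using List.length_pos_of_ne_nil hgt)]
  rw [List.map_congr_left (fun i hi => by
    rw [pv_getD_cons_eq _ gh _ i (by
      rw [PySem.List.mem_pyRange_one] at hi; exact hi.1) []])]
  rw [pv_drop_len_sub_one _ (List.cons_ne_nil _ _)]
  rw [pv_pySetD_neg_one, pv_set_last _ _ (by simp)]
  rw [PySem.List.foldl_append_singleton_eq_map]
  simp only [List.take_one, List.head?_cons, Option.toList_some]
  rw [show ∀ (F : List Int) M (x L : List Int), ([F] ++ M ++ [x]).dropLast ++ [L] = [F] ++ M ++ [L] from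
    fun F M x L => by rw [List.dropLast_concat]]
  simp

-- ShiftRow: A's index loop is the rotate-right-by-one, B's batched slices rotate by the count
theorem pv_pyRange_neg_cons (n : Nat) :
    PySem.List.pyRange ((n : Int) + 1) 0 (-1) = ((n : Int) + 1) :: PySem.List.pyRange (n : Int) 0 (-1) := by
  rw [PySem.List.pyRange_neg_one_eq_reverse, PySem.List.pyRange_neg_one_eq_reverse]
  rw [show (0:Int) + 1 = 1 from rfl, show (n:Int) + 1 + 1 = ((n:Int) + 1) + 1 from rfl]
  rw [PySem.List.pyRange_one_succ_right (by omega)]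
  simp

theorem pv_shift_loop (n : Nat) (xs : List (List Int)) (h : n < xs.length) :
    (PySem.List.pyRange (n : Int) 0 (-1)).foldl
        (fun h i => PySem.List.pySetD h i (PySem.List.pyGetD h (i - 1) [])) xs
      = xs.take 1 ++ xs.take n ++ xs.drop (n + 1) := by
  induction n generalizing xs with
  | zero =>
    rw [show ((0:Nat):Int) = 0 from rfl, PySem.List.pyRange_neg_one_eq_reverse]
    simp
    conv_lhs => rw [← List.take_append_drop 1 xs]
    simp
  | succ m ih =>
    rw [Nat.cast_succ, pv_pyRange_neg_cons, List.foldl_cons]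
    have hs : (PySem.List.pySetD xs ((m:Int) + 1) (PySem.List.pyGetD xs ((m:Int) + 1 - 1) []))
        = xs.set (m + 1) (xs.getD m []) := by
      rw [show ((m:Int) + 1 - 1) = (m : Int) from by ring, PySem.List.pyGetD_natCast,
        show ((m:Int) + 1) = ((m + 1 : Nat) : Int) from by push_cast; ring, PySem.List.pySetD_natCast]
    rw [hs, ih _ (by simpa using by omega)]
    have hm1 : m + 1 < xs.length := h
    rw [List.take_set, List.take_set, List.drop_set]
    rw [if_neg (by omega)]
    have h1 : (List.take 1 xs).set (m + 1) (xs.getD m []) = List.take 1 xs := List.set_eq_of_length_le (by simp)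
    have h2 : (List.take m xs).set (m + 1) (xs.getD m []) = List.take m xs := List.set_eq_of_length_le (by simp)
    rw [h1, h2]
    have h3 : (List.drop (m + 1) xs).set (m + 1 - (m + 1)) (xs.getD m []) = xs.getD m [] :: List.drop (m + 2) xs := by
      rw [Nat.sub_self, List.drop_eq_getElem_cons hm1, List.set_cons_zero,
        List.getD_eq_getElem _ _ (by omega)]
    rw [h3]
    have h4 : List.take (m + 1) xs = List.take m xs ++ [xs.getD m []] := by
      rw [List.take_add_one, List.getElem?_eq_getElem (by omega : m < xs.length), List.getD_eq_getElem _ _ (by omega)]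
      rfl
    rw [h4]
    simp

theorem pv_shiftA_eq (g : List (List Int)) (h : g ≠ []) (r : Int) (hr : r = (g.length : Int)) :
    pvShiftA r g = g.getLast h :: g.dropLast := by
  have hpos : 0 < g.length := List.length_pos_of_ne_nil h
  unfold pvShiftA
  rw [show r - 1 = ((g.length - 1 : Nat) : Int) from by omega]
  rw [pv_shift_loop (g.length - 1) g (by omega)]
  rw [PySem.List.pyGetD_neg_one g [] h]
  rw [show g.length - 1 + 1 = g.length from by omega, List.drop_length]
  rw [← List.dropLast_eq_take]
  rw [List.take_one]
  rw [List.head?_eq_some_head h]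
  show PySem.List.pySetD ((some (g.head h)).toList ++ g.dropLast ++ []) 0 (g.getLast h) = _
  rw [show (0:Int) = ((0:Nat):Int) from rfl, PySem.List.pySetD_natCast]
  simp

theorem pv_rotate_last (g : List (List Int)) (h : g ≠ []) :
    g.rotate (g.length - 1) = g.getLast h :: g.dropLast := by
  rw [List.rotate_eq_drop_append_take (by omega)]
  obtain ⟨init, x, rfl⟩ := (List.eq_nil_or_concat g).resolve_left h
  simp

theorem pv_modeq_key (L K : Nat) (hL : 0 < L) : (L - K % L) % L = ((L - 1) * K) % L := by
  have hS : K % L < L := Nat.mod_lt K hL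
  zify [Nat.le_of_lt hS, (by omega : 1 ≤ L)]
  have hL0 : (L : Int) ≡ 0 [ZMOD (L:Int)] := Int.modEq_iff_dvd.mpr (by simp)
  have hK : (K : Int) ≡ (K : Int) % (L : Int) [ZMOD (L:Int)] :=
    (Int.emod_emod_of_dvd (K:Int) (dvd_refl (L:Int))).symm
  calc ((L:Int) - (K:Int) % (L:Int)) ≡ 0 - (K:Int) % (L:Int) [ZMOD (L:Int)] := hL0.sub_right _
    _ = (-1) * ((K:Int) % (L:Int)) := by ring
    _ ≡ (-1) * (K:Int) [ZMOD (L:Int)] := (hK.symm).mul_left _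
    _ = (0 - 1) * K := by ring
    _ ≡ ((L:Int) - 1) * K [ZMOD (L:Int)] := (hL0.symm.sub_right 1).mul_right _

theorem pv_shiftRows_rotate (g : List (List Int)) (k : Int) (hk : 0 ≤ k) (h : g ≠ []) :
    pvShiftRows (g.length : Int) k g = g.rotate ((g.length - 1) * k.toNat) := by
  have hL : 0 < g.length := List.length_pos_of_ne_nil h
  by_cases hk0 : k = 0
  · simp [pvShiftRows, hk0]
  · unfold pvShiftRows
    rw [if_pos hk0]
    have hLZ : (0:Int) < (g.length : Int) := by exact_mod_cast hL
    have hmod : PySem.Int.mod k (g.length : Int) = k % (g.length : Int) := by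
      rw [PySem.Int.mod_eq_emod_of_pos hLZ]
    simp only [hmod]
    have hs1 : (0:Int) ≤ k % (g.length : Int) := Int.emod_nonneg k (by omega)
    have hs2 : k % (g.length : Int) < g.length := Int.emod_lt_of_pos k hLZ
    rw [PySem.List.slice_from _ (by omega), PySem.List.slice_to _ (by omega)]
    have hcast : k % (g.length : Int) = ((k.toNat % g.length : Nat) : Int) := by
      rw [show k = (k.toNat : Int) from by omega]
      push_cast
      rfl
    have hm : ((g.length : Int) - k % (g.length : Int)).toNat = g.length - k.toNat % g.length := by
      rw [hcast]
      omega
    rw [hm, ← List.rotate_eq_drop_append_take (by omega)]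
    rw [← List.rotate_mod, pv_modeq_key _ _ hL, List.rotate_mod]

theorem pv_len_shiftRows (g : List (List Int)) (n k : Int) :
    (pvShiftRows n k g).length = g.length := by
  unfold pvShiftRows
  split_ifs with hk
  · simp [PySem.List.slice, PySem.List.clampIdx]
    omega
  · rfl

theorem pv_len_rotBorder (g : List (List Int)) (h : 2 ≤ g.length) :
    (pvRotBorder g).length = g.length := by
  simp only [pvRotBorder, PySem.List.foldl_append_singleton_eq_map, List.length_append,
    List.length_map, PySem.List.length_pyRange_one, List.length_cons, List.length_nil]
  omega

-- the main induction: A's op-by-op fold equals B's batched fold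
theorem pv_main (n : Int) (ops : List String) :
    ∀ (b : List (List Int)) (k : Int), 0 ≤ k → b ≠ [] → n = (b.length : Int) →
    ("Rotate" ∈ ops → 2 ≤ b.length) →
    ops.foldl (fun g op => if op = "Rotate" then pvRotA g else if op = "ShiftRow" then pvShiftA n g else g)
        (pvShiftRows n k b)
      = (fun p : List (List Int) × Int => pvShiftRows n p.2 p.1)
          (ops.foldl (fun p op =>
            if op = "ShiftRow" then (p.1, p.2 + 1)
            else if op = "Rotate" then (pvRotBorder (pvShiftRows n p.2 p.1), 0)
            else p) (b, k)) := by
  induction ops with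
  | nil =>
    intro b k hk hb hn hrot
    rfl
  | cons op rest ih =>
    intro b k hk hb hn hrot
    simp only [List.foldl_cons]
    by_cases hR : op = "Rotate"
    · have h2 : 2 ≤ b.length := hrot (by rw [hR]; exact List.mem_cons_self)
      rw [if_pos hR, if_neg (by rw [hR]; decide), if_pos hR]
      have hlenS : (pvShiftRows n k b).length = b.length := by
        rw [hn]; exact pv_len_shiftRows b _ k
      rw [pv_rot_eq _ (by omega)]
      have hb' : pvRotBorder (pvShiftRows n k b) ≠ [] := by
        have := pv_len_rotBorder (pvShiftRows n k b) (by omega)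
        intro e
        rw [e] at this
        simp at this
        omega
      have := ih (pvRotBorder (pvShiftRows n k b)) 0 (by omega) hb'
        (by rw [pv_len_rotBorder _ (by omega), hlenS]; exact hn)
        (fun _ => by rw [pv_len_rotBorder _ (by omega), hlenS]; exact h2)
      rw [show pvShiftRows n 0 (pvRotBorder (pvShiftRows n k b)) = pvRotBorder (pvShiftRows n k b) from by
        simp [pvShiftRows]] at this
      exact this
    · by_cases hS : op = "ShiftRow"
      · rw [if_neg hR, if_pos hS, if_pos hS]
        have hstep : pvShiftA n (pvShiftRows n k b) = pvShiftRows n (k + 1) b := by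
          subst hn
          rw [pv_shiftRows_rotate b k hk hb, pv_shiftRows_rotate b (k+1) (by omega) hb]
          have hlenrot : (b.rotate ((b.length - 1) * k.toNat)).length = b.length := by simp
          have hner : b.rotate ((b.length - 1) * k.toNat) ≠ [] := by
            intro e; rw [e] at hlenrot; simp at hlenrot; exact hb (List.length_eq_zero_iff.mp hlenrot.symm)
          rw [show pvShiftA (b.length : Int) (b.rotate ((b.length - 1) * k.toNat))
              = (b.rotate ((b.length - 1) * k.toNat)).rotate ((b.rotate ((b.length - 1) * k.toNat)).length - 1) from by
            rw [pv_shiftA_eq _ hner _ (by simp), pv_rotate_last _ hner]]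
          rw [List.rotate_rotate, hlenrot]
          congr 1
          have : (k+1).toNat = k.toNat + 1 := by omega
          rw [this]
          ring
        rw [hstep]
        exact ih b (k+1) (by omega) hb hn (fun hm => hrot (List.mem_cons_of_mem _ hm))
      · rw [if_neg hR, if_neg hS, if_neg hS, if_neg hR]
        exact ih b k hk hb hn (fun hm => hrot (List.mem_cons_of_mem _ hm))

-- ===== VERDICT (by name: the statement is the Claim_ definition above) =====
theorem solution_spec : Claim_equal_solution := by
  intro rc operations _ hpre
  unfold Spec_solution solution solution_alt
  have key := pv_main (rc.length : Int) operations rc 0 (by omega) hpre.1 rfl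
    (fun hmem => (hpre.2 hmem).1)
  rw [show pvShiftRows (rc.length : Int) 0 rc = rc from by simp [pvShiftRows]] at key
  exact key
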